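-- pv_equiv track=rewrite | github.com/msft-mirror-aosp/platform.frameworks.libs.binary_translation | tools/prettify_asm.py | Version
-- ===== SOURCE A (Python) =====
-- def Version(str):
--   result = []
--   isdigit = False
--   word = ''
--   for char in str + ('a' if str[-1:].isdigit() else '0'):
--     if char.isdigit() == isdigit:
--       word += char
--     else:
--       if isdigit:
--         result.append(('0' * 1000 + word)[-1000:])
--       else:
--         result.append((word + ' ' * 1000)[:1000])
--       isdigit = not isdigit
--       word = char
--   return '.'.join(result)
-- ===== SOURCE B (Python) =====
-- def Version(str):
--   parts = []
--   if not str or str[0].isdigit():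
--     parts.append(' ' * 1000)
--   i = 0
--   n = len(str)
--   while i < n:
--     d = str[i].isdigit()
--     j = i + 1
--     while j < n and str[j].isdigit() == d:
--       j += 1
--     word = str[i:j]
--     parts.append(('0' * 1000 + word)[-1000:] if d else (word + ' ' * 1000)[:1000])
--     i = j
--   return '.'.join(parts)
-- ===== Notes on version B (the rewrite author's own statement) =====
-- stated objective: alternative
-- what changed: Replaces the sentinel-appending single-pass flag state machine with a two-pointer run extraction (scan each maximal digit/non-digit run with an inner pointer), an explicit prepend of the empty leading non-digit chunk, and a separate formatting pass.
import Mathlib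
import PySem

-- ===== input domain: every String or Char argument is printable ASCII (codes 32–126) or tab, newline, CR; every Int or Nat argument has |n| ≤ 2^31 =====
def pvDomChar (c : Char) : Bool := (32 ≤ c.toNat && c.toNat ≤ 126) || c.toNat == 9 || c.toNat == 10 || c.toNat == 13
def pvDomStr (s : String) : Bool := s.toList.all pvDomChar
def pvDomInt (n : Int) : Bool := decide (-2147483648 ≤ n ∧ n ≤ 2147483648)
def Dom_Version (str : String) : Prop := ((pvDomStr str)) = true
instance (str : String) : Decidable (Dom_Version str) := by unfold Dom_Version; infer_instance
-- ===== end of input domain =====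

set_option maxRecDepth 8192


-- B replaces A's sentinel-driven single-pass flag state machine by a two-pointer run
-- extraction with an explicit leading empty chunk and a separate formatting pass
-- (objective: alternative decomposition, same cost).

-- shared helpers: the character class test and the two padding slices both Pythons write verbatim
def pvCls (c : Char) : Bool := PySem.Chars.isdigit c

-- ('0' * 1000 + word)[-1000:]
def pvPadDig (w : List Char) : List Char :=
  PySem.List.slice (List.replicate 1000 '0' ++ w) (some (-1000)) none

-- (word + ' ' * 1000)[:1000]
def pvPadWord (w : List Char) : List Char :=
  PySem.List.slice (w ++ List.replicate 1000 ' ') none (some 1000)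

-- ===== PORT A =====
-- loop body of A: state = (result, isdigit, word)
def pvStepA (st : List (List Char) × Bool × List Char) (c : Char) :
    List (List Char) × Bool × List Char :=
  if pvCls c == st.2.1 then (st.1, st.2.1, st.2.2 ++ [c])
  else (st.1 ++ [if st.2.1 then pvPadDig st.2.2 else pvPadWord st.2.2], !st.2.1, [c])

def Version (str : String) : String :=
  let s := str.toList
  -- str + ('a' if str[-1:].isdigit() else '0')
  let sent : Char :=
    if PySem.Chars.strIsdigit (PySem.List.slice s (some (-1)) none) then 'a' else '0'
  let st := (s ++ [sent]).foldl pvStepA ([], false, [])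
  String.ofList (PySem.Chars.join ['.'] st.1)

-- ===== PORT B =====
-- the two-pointer while loops of Source B: each outer step peels one maximal same-class run
-- (the inner `while j < n and str[j].isdigit() == d` scan is takeWhile/dropWhile)
def pvRuns : List Char → List (Bool × List Char)
  | [] => []
  | c :: cs =>
    (pvCls c, c :: cs.takeWhile (fun x => pvCls x == pvCls c)) ::
      pvRuns (cs.dropWhile (fun x => pvCls x == pvCls c))
termination_by s => s.length
decreasing_by
  simp only [List.length_cons]
  have := List.length_dropWhile_le (p := fun x => pvCls x == pvCls c) (l := cs)
  omega

def pvFmt (r : Bool × List Char) : List Char :=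
  if r.1 then pvPadDig r.2 else pvPadWord r.2

def Version_alt (str : String) : String :=
  let s := str.toList
  -- if not str or str[0].isdigit(): parts.append(' ' * 1000)
  let lead : List (List Char) :=
    if (match s with | [] => true | c :: _ => pvCls c) then [List.replicate 1000 ' '] else []
  String.ofList (PySem.Chars.join ['.'] (lead ++ (pvRuns s).map pvFmt))

-- ===== PRECONDITION & SPEC =====
def Spec_Version (str : String) (out : String) : Prop := out = Version_alt str
instance (str : String) (out : String) : Decidable (Spec_Version str out) := by
  unfold Spec_Version; infer_instance

-- ===== CLAIM (what is proved, stated in full; the proofs are below) =====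
def Claim_equal_Version : Prop := ∀ (str : String), Dom_Version str → Spec_Version str (Version str)

-- ===== LEMMAS AND PROOFS =====

-- class of the last character of s, defaulting to b
def pvLast (b : Bool) (s : List Char) : Bool :=
  ((s.getLast?).map pvCls).getD b

lemma pvPadWord_nil : pvPadWord [] = List.replicate 1000 ' ' := by
  unfold pvPadWord
  rw [PySem.List.slice_to]
  · rw [List.nil_append, List.take_replicate]
    norm_num
    omega
  · norm_num

-- a whole block of characters of the current class is appended to the current word
lemma foldA_homog (l : List Char) (res : List (List Char)) (b : Bool) (w : List Char)
    (h : ∀ c ∈ l, pvCls c = b) :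
    List.foldl pvStepA (res, b, w) l = (res, b, w ++ l) := by
  induction l generalizing w with
  | nil => simp
  | cons c cs ih =>
    have hc : pvCls c = b := h c (by simp)
    have := ih (w ++ [c]) (fun x hx => h x (by simp [hx]))
    simp [List.foldl_cons, pvStepA, hc, this]

-- one class-switching character flushes the current word
lemma foldA_base (res : List (List Char)) (b : Bool) (w : List Char) (x : Char)
    (hx : pvCls x ≠ b) :
    List.foldl pvStepA (res, b, w) [x] =
      (res ++ [if b then pvPadDig w else pvPadWord w], pvCls x, [x]) := by
  have hbe : (pvCls x == b) = false := by simp [hx]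
  simp only [List.foldl_cons, List.foldl_nil, pvStepA, hbe]
  simp only [Bool.false_eq_true, if_false]
  refine Prod.ext rfl (Prod.ext ?_ rfl)
  cases hb : b <;> cases hxx : pvCls x <;> simp_all

lemma dropWhile_head_not {p : Char → Bool} :
    ∀ (l : List Char) (a : Char), (l.dropWhile p).head? = some a → p a = false := by
  intro l
  induction l with
  | nil => intro a h; simp [List.dropWhile] at h
  | cons c cs ih =>
    intro a h
    by_cases hc : p c = true
    · rw [List.dropWhile_cons_of_pos hc] at h; exact ih a h
    · rw [List.dropWhile_cons_of_neg hc] at h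
      simp at h; subst h; simpa using hc

-- dropping the first run does not change the class of the last character
lemma pvLast_drop (c : Char) (cs : List Char) (b₀ : Bool) :
    pvLast (pvCls c) (cs.dropWhile (fun x => pvCls x == pvCls c)) = pvLast b₀ (c :: cs) := by
  cases hd : cs.dropWhile (fun x => pvCls x == pvCls c) with
  | nil =>
    have hall : ∀ x ∈ cs, pvCls x = pvCls c := by
      intro x hx
      have := (List.dropWhile_eq_nil_iff).mp hd x hx
      simpa using this
    have hg : (c :: cs).getLast? = some ((c :: cs).getLast (by simp)) :=
      List.getLast?_eq_some_getLast _
    have hmem : (c :: cs).getLast (by simp) ∈ c :: cs := List.getLast_mem _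
    have hcls : pvCls ((c :: cs).getLast (by simp)) = pvCls c := by
      rcases List.mem_cons.mp hmem with h | h
      · rw [h]
      · exact hall _ h
    simp [pvLast, hg, hcls]
  | cons y ys =>
    have hsplit : c :: cs =
        (c :: cs.takeWhile (fun x => pvCls x == pvCls c)) ++
          cs.dropWhile (fun x => pvCls x == pvCls c) := by
      simp
    have hne : (y :: ys).getLast? = some ((y :: ys).getLast (by simp)) :=
      List.getLast?_eq_some_getLast _
    have hthis : (c :: cs).getLast? = (cs.dropWhile (fun x => pvCls x == pvCls c)).getLast? := by
      rw [hsplit, List.getLast?_append, hd, hne, Option.some_or]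
    simp [pvLast, hthis, hd, hne]

-- main invariant: from a mid-run state, running the rest of the string followed by one
-- class-switching character flushes the word and then one chunk per run of the rest
lemma foldA_main (n : Nat) : ∀ (s : List Char), s.length ≤ n →
    ∀ (res : List (List Char)) (b : Bool) (w : List Char) (x : Char),
    (∀ c, s.head? = some c → pvCls c ≠ b) → pvCls x ≠ pvLast b s →
    List.foldl pvStepA (res, b, w) (s ++ [x]) =
      (res ++ (if b then pvPadDig w else pvPadWord w) :: (pvRuns s).map pvFmt,
        pvCls x, [x]) := by
  induction n with
  | zero =>
    intro s hs res b w x _ hx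
    cases s with
    | cons c cs => simp at hs
    | nil =>
      have hxb : pvCls x ≠ b := by simpa [pvLast] using hx
      rw [List.nil_append, foldA_base res b w x hxb]
      simp [pvRuns]
  | succ n ih =>
    intro s hs res b w x hhead hx
    cases s with
    | nil =>
      have hxb : pvCls x ≠ b := by simpa [pvLast] using hx
      rw [List.nil_append, foldA_base res b w x hxb]
      simp [pvRuns]
    | cons c cs =>
      have hc : pvCls c ≠ b := hhead c rfl
      have hsplit : (c :: cs) ++ [x] =
          c :: (cs.takeWhile (fun y => pvCls y == pvCls c) ++
            (cs.dropWhile (fun y => pvCls y == pvCls c) ++ [x])) := by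
        simp [← List.append_assoc]
      rw [hsplit]
      rw [List.foldl_cons]
      have hstep : pvStepA (res, b, w) c =
          (res ++ [if b then pvPadDig w else pvPadWord w], pvCls c, [c]) := by
        have hh : List.foldl pvStepA (res, b, w) [c] =
            (res ++ [if b then pvPadDig w else pvPadWord w], pvCls c, [c]) :=
          foldA_base res b w c hc
        simpa using hh
      rw [hstep, List.foldl_append]
      rw [foldA_homog (cs.takeWhile (fun y => pvCls y == pvCls c))
        (res ++ [if b then pvPadDig w else pvPadWord w]) (pvCls c) [c]
        (fun y hy => by simpa using List.mem_takeWhile_imp hy)]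
      rw [ih (cs.dropWhile (fun y => pvCls y == pvCls c))
        (by have := List.length_dropWhile_le (p := fun y => pvCls y == pvCls c) (l := cs)
            simp at hs; omega)
        _ (pvCls c) _ x
        (fun a ha => by simpa using dropWhile_head_not cs a ha)
        (by rw [pvLast_drop c cs b]; exact hx)]
      rw [pvRuns]
      simp [pvFmt]

-- `str[-1:].isdigit()` is the class of the last character (false for the empty string)
lemma strIsdigit_lastSlice : ∀ (cs : List Char) (c : Char),
    PySem.Chars.strIsdigit ((c :: cs).drop ((c :: cs).length - 1)) = pvLast false (c :: cs) := by
  intro cs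
  induction cs with
  | nil => intro c; simp [PySem.Chars.strIsdigit, pvLast, pvCls]
  | cons y ys ih =>
    intro c
    have hlen : (c :: y :: ys).length - 1 = ((y :: ys).length - 1) + 1 := by
      simp
    rw [hlen, List.drop_succ_cons, ih y]
    simp [pvLast]

lemma pvCls_sent (b : Bool) : pvCls (if b then 'a' else '0') = !b := by
  cases b <;> decide

theorem Version_spec : Claim_equal_Version := by
  intro str _
  show Version str = Version_alt str
  simp only [Version, Version_alt]
  cases hs : str.toList with
  | nil =>
    rw [PySem.List.slice_from_neg_one]
    simp only [List.length_nil, List.drop_nil, List.nil_append]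
    have h0 : PySem.Chars.strIsdigit ([] : List Char) = false := by decide
    rw [h0]
    simp only [if_neg (by simp : ¬ (false : Bool) = true)]
    rw [foldA_base [] false [] '0' (by decide)]
    simp [pvRuns, pvPadWord_nil]
  | cons c cs =>
    rw [PySem.List.slice_from_neg_one, strIsdigit_lastSlice cs c]
    have hsent : pvCls (if pvLast false (c :: cs) then 'a' else '0')
        = !(pvLast false (c :: cs)) := pvCls_sent _
    set x : Char := if pvLast false (c :: cs) then 'a' else '0' with hxdef
    have hxne : pvCls x ≠ pvLast false (c :: cs) := by
      rw [hsent]; cases pvLast false (c :: cs) <;> simp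
    by_cases hc : pvCls c = true
    · -- leading digit run: A immediately flushes the empty non-digit word,
      -- B prepends the empty chunk
      rw [foldA_main ((c :: cs).length) (c :: cs) le_rfl [] false [] x
        (fun a ha => by simp at ha; subst ha; simp [hc]) hxne]
      simp [hc, pvPadWord_nil]
    · -- leading non-digit run: it is absorbed into the initial empty word
      have hc' : pvCls c = false := by simpa using hc
      have hsplit : (c :: cs) ++ [x] =
          c :: (cs.takeWhile (fun y => pvCls y == pvCls c) ++
            (cs.dropWhile (fun y => pvCls y == pvCls c) ++ [x])) := by
        simp [← List.append_assoc]
      rw [hsplit, List.foldl_cons]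
      have hstep : pvStepA ([], false, []) c = ([], false, [c]) := by
        simp [pvStepA, hc']
      rw [hstep, List.foldl_append]
      rw [foldA_homog (cs.takeWhile (fun y => pvCls y == pvCls c)) [] false [c]
        (fun y hy => by have := List.mem_takeWhile_imp hy; simp at this; simp [this, hc'])]
      rw [foldA_main (cs.dropWhile (fun y => pvCls y == pvCls c)).length _ le_rfl
        _ false _ x
        (fun a ha => by
          have h4 := dropWhile_head_not cs a ha
          simp [hc'] at h4
          simp [h4])
        (by
          have h3 : pvLast false (List.dropWhile (fun y => pvCls y == pvCls c) cs)
              = pvLast false (c :: cs) := by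
            conv_lhs => rw [← hc']
            exact pvLast_drop c cs false
          rw [h3]; exact hxne)]
      rw [pvRuns]
      simp [pvFmt, hc']
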